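-- pv_equiv track=rewrite | github.com/vladtrc/bulochnaya-satellites | analytics/algo-working.py | intervals_cut_by_sum
-- ===== SOURCE A (Python) =====
-- def intervals_cut_by_sum(array, s):
--     output_array = []
--     rolling_sum = 0
--     for interval in array:
--         rolling_sum += interval[1] - interval[0]
--         if rolling_sum <= s:
--             output_array.append(interval)
--         else:
--             right_bound = interval[1] - rolling_sum + s
--             output_array.append([interval[0], right_bound])
--             break
--     return output_array
-- ===== SOURCE B (Python) =====
-- def intervals_cut_by_sum(array, s):
--     # Phase 1: prefix sums of interval lengths.
--     prefix = []
--     t = 0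
--     for iv in array:
--         t += iv[1] - iv[0]
--         prefix.append(t)
--     # Phase 2: first index whose cumulative length strictly exceeds s.
--     i = next((k for k, p in enumerate(prefix) if p > s), None)
--     if i is None:
--         return list(array)
--     return array[:i] + [[array[i][0], array[i][1] - prefix[i] + s]]
-- ===== Notes on version B (the rewrite author's own statement) =====
-- stated objective: alternative
-- what changed: B splits the single stateful scan into two phases: it materialises the list of cumulative interval lengths, locates the first index whose prefix sum strictly exceeds s, and builds the result with a slice plus one truncated interval, instead of A's append-and-break loop. Pre_ excludes arrays containing an interval with fewer than 2 bounds, on which A raises unless the cut happens to break before reaching it, while B's whole-array prefix pass always raises.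
-- outside the precondition, e.g. on intervals_cut_by_sum([[2, 158], [], [8]], 2): A returns [[2, 4]], B raises IndexError
import Mathlib
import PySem

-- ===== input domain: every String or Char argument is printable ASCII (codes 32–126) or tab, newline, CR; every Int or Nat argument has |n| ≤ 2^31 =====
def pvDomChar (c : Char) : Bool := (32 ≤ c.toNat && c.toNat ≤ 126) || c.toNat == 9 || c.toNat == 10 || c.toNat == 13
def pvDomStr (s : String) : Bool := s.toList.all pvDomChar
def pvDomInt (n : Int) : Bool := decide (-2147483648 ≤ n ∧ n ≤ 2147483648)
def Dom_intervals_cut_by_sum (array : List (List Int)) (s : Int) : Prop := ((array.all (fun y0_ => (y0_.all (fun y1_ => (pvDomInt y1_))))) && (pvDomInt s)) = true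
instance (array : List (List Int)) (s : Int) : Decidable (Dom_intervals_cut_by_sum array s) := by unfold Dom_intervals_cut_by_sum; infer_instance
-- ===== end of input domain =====

-- ===== PORT A =====
-- B changes the decomposition only (prefix-sum list + first-exceeding index + slice); same O(n) cost.
-- Equivalence is about the return value; neither version mutates its arguments.
-- interval[1] / interval[0]: Pre_ guarantees both indices exist; getD 0 is never taken under Pre_.
def pvLenA (iv : List Int) : Int :=
  (PySem.List.pyGet? iv 1).getD 0 - (PySem.List.pyGet? iv 0).getD 0

def pvGoA (s : Int) : List (List Int) → Int → List (List Int)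
  | [], _ => []
  | iv :: rest, rolling_sum =>
    let rs' := rolling_sum + pvLenA iv
    if rs' ≤ s then iv :: pvGoA s rest rs'
    else [[(PySem.List.pyGet? iv 0).getD 0, (PySem.List.pyGet? iv 1).getD 0 - rs' + s]]

def intervals_cut_by_sum (array : List (List Int)) (s : Int) : List (List Int) :=
  pvGoA s array 0

-- ===== PORT B =====
-- phase 1 of Source B: prefix sums of interval lengths
def pvPref (t : Int) : List (List Int) → List Int
  | [] => []
  | iv :: rest =>
    let t' := t + pvLenA iv
    t' :: pvPref t' rest

-- phase 2 of Source B: first index with prefix sum strictly greater than s (the next(...) generator)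
def pvFirstExceed (s : Int) : List Int → Option Nat
  | [] => none
  | p :: rest => if p > s then some 0 else (pvFirstExceed s rest).map (· + 1)

def intervals_cut_by_sum_alt (array : List (List Int)) (s : Int) : List (List Int) :=
  let pref := pvPref 0 array
  match pvFirstExceed s pref with
  | none => array
  | some i =>
    let iv := array.getD i []
    array.take i ++ [[(PySem.List.pyGet? iv 0).getD 0,
                      (PySem.List.pyGet? iv 1).getD 0 - pref.getD i 0 + s]]

-- ===== PRECONDITION & SPEC =====
-- Pre_ excludes arrays containing an interval with fewer than 2 bounds: A raises IndexError there
-- unless its loop happens to break before reaching the short interval (in which case A returns but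
-- B's whole-array prefix pass raises); every interval of a well-formed input has 2 bounds.
def Pre_intervals_cut_by_sum (array : List (List Int)) (s : Int) : Prop :=
  ∀ iv ∈ array, 2 ≤ iv.length
instance (array : List (List Int)) (s : Int) : Decidable (Pre_intervals_cut_by_sum array s) := by
  unfold Pre_intervals_cut_by_sum; infer_instance

def pvWitness_intervals_cut_by_sum : List (List Int) × Int := ([[0, 3], [4, 10]], 5)

def Spec_intervals_cut_by_sum (array : List (List Int)) (s : Int) (out : List (List Int)) : Prop := out = intervals_cut_by_sum_alt array s
instance (array : List (List Int)) (s : Int) (out : List (List Int)) : Decidable (Spec_intervals_cut_by_sum array s out) := by unfold Spec_intervals_cut_by_sum; infer_instance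

-- ===== CLAIM (what is proved, stated in full; the proofs are below) =====
def Claim_equal_intervals_cut_by_sum : Prop := ∀ (array : List (List Int)) (s : Int), Dom_intervals_cut_by_sum array s → Pre_intervals_cut_by_sum array s → Spec_intervals_cut_by_sum array s (intervals_cut_by_sum array s)

-- ===== LEMMAS AND PROOFS =====
theorem pvGoA_eq (s : Int) (array : List (List Int)) :
    ∀ rs : Int, pvGoA s array rs =
      (match pvFirstExceed s (pvPref rs array) with
       | none => array
       | some i =>
         let iv := array.getD i []
         array.take i ++ [[(PySem.List.pyGet? iv 0).getD 0,
                           (PySem.List.pyGet? iv 1).getD 0 - (pvPref rs array).getD i 0 + s]]) := by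
  induction array with
  | nil => intro rs; simp [pvGoA, pvPref, pvFirstExceed]
  | cons iv rest ih =>
    intro rs
    simp only [pvGoA, pvPref, pvFirstExceed]
    by_cases h : rs + pvLenA iv ≤ s
    · rw [if_pos h, if_neg (show ¬ (rs + pvLenA iv > s) by omega)]
      rw [ih (rs + pvLenA iv)]
      cases hfe : pvFirstExceed s (pvPref (rs + pvLenA iv) rest) with
      | none => simp
      | some j => simp [List.take_succ_cons]
    · rw [if_neg h, if_pos (show rs + pvLenA iv > s by omega)]
      simp [pvLenA]

-- ===== VERDICT (by name: the statement is the Claim_ definition above) =====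
theorem intervals_cut_by_sum_spec : Claim_equal_intervals_cut_by_sum := by
  intro array s _ _
  unfold Spec_intervals_cut_by_sum intervals_cut_by_sum intervals_cut_by_sum_alt
  exact pvGoA_eq s array 0
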